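-- pv_equiv track=rewrite | github.com/dohyun96305/Coding | 99CLUB_Challenger/0325_MON_Level2.py | solution
-- ===== SOURCE A (Python) =====
-- def solution(storey):
--     answer = 0
--     temp = 0 # 10이 넘어갈 때 +1 용도
--     number_length = len(str(storey)) - 1
--     number_reverse_str = str(storey)[::-1]
--
--     for a, i in enumerate(number_reverse_str) :
--         number = int(i) + temp
--
--         if number > 5 : # 만약 5 초과일 경우 10 맞추는 것이 이득
--             answer += 10 - number
--             temp = 1
--
--             if a == number_length : # 마지막 자리수 처리
--                 answer += 1
--                 break
--
--         elif number == 5 : # 만약 5일 경우 다음 자리 수 확인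
--             if a == number_length :
--                 answer += 5
--                 break
--
--             else :
--                 if int(number_reverse_str[a+1]) <= 4 : # 다음 자리 수 + 1이 5가 넘지 않을 경우
--                     answer += number
--                     temp = 0
--
--                 else : # 다음 자리 수 + 1이 5가 넘을 경우
--                     answer += (10 - number)
--                     temp = 1
--
--         else : # 만약 5미만 일 경우 0 맞추는 것이 이득
--             answer += number
--             temp = 0
--
--     return answer
-- ===== SOURCE B (Python) =====
-- def solution(storey):
--     # Backward digit DP over the decimal string, most-significant digit first.
--     # State (g0, g1) = minimal button presses to finish the digits read so far
--     # when the carry coming out of the remaining (lower) digits is 0 resp. 1.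
--     g0, g1 = 0, 1
--     for ch in str(storey):
--         d = int(ch)
--         g0, g1 = min(d + g0, 10 - d + g1), min(d + 1 + g0, 9 - d + g1)
--     return g0
-- ===== Notes on version B (the rewrite author's own statement) =====
-- stated objective: simpler
-- what changed: Replaces the greedy least-significant-first scan with carry flag and one-digit lookahead by a two-state digit dynamic program (min cost under carry 0/1) folded over the decimal string, with no reversal, no indexing and no lookahead.
import Mathlib
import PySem

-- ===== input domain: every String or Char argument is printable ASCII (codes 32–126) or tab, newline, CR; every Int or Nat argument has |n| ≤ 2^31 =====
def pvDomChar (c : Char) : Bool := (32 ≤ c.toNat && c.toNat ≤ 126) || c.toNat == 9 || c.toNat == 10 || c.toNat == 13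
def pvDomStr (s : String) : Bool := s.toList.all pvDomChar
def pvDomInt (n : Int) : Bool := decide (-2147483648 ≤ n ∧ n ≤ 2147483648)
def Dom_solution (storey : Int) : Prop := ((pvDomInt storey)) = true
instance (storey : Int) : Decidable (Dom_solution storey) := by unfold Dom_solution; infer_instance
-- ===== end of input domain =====

-- B replaces A's greedy reversed scan (carry flag + one-digit lookahead) with a two-carry-state
-- digit DP folded over the decimal string; objective: simpler (shorter, no reversal/indexing).

-- ===== PORT A =====

-- int(ch) on a single character: exact on digit characters '0'..'9', the only characters the
-- ports reach under Pre_solution (Python raises ValueError on any other character / on '-').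
def pvDigit (c : Char) : Int := (c.toNat : Int) - 48

-- A's loop over enumerate(str(storey)[::-1]) as the obvious structural recursion over the
-- reversed character list, state = (answer, temp); 'a == number_length' becomes 'rest = []',
-- the lookahead number_reverse_str[a+1] becomes rest.headD (only read when rest ≠ []);
-- A's two 'break's occur only on the final iteration, so the loop shape is unchanged.
def pvLoopA : List Char → Int → Int → Int
  | [], answer, _temp => answer
  | i :: rest, answer, temp =>
    let number := pvDigit i + temp
    if number > 5 then                       -- > 5: round up to 10
      if rest = [] then answer + (10 - number) + 1   -- last digit: answer += 10-number; answer += 1; break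
      else pvLoopA rest (answer + (10 - number)) 1
    else if number = 5 then                  -- == 5: look at the next digit
      if rest = [] then answer + 5                   -- last digit: answer += 5; break
      else if pvDigit (rest.headD '0') ≤ 4 then pvLoopA rest (answer + number) 0
      else pvLoopA rest (answer + (10 - number)) 1
    else pvLoopA rest (answer + number) 0    -- < 5: go down to 0

def solution (storey : Int) : Int :=
  pvLoopA (PySem.Int.toChars storey).reverse 0 0

-- ===== PORT B =====

def solution_alt (storey : Int) : Int :=
  ((PySem.Int.toChars storey).foldl
    (fun g ch =>
      let d := pvDigit ch
      (min (d + g.1) (10 - d + g.2), min (d + 1 + g.1) (9 - d + g.2)))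
    (0, 1)).1

-- ===== PRECONDITION & SPEC =====

-- A raises ValueError on every negative storey (int('-') on the sign character); B raises there too.
def Pre_solution (storey : Int) : Prop := 0 ≤ storey
instance (storey : Int) : Decidable (Pre_solution storey) := by unfold Pre_solution; infer_instance

def pvWitness_solution : Int := 2554

def Spec_solution (storey : Int) (out : Int) : Prop := out = solution_alt storey
instance (storey : Int) (out : Int) : Decidable (Spec_solution storey out) := by unfold Spec_solution; infer_instance

-- ===== CLAIM (what is proved, stated in full; the proofs are below) =====
def Claim_equal_solution : Prop := ∀ (storey : Int), Dom_solution storey → Pre_solution storey → Spec_solution storey (solution storey)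

-- ===== LEMMAS AND PROOFS =====

-- Cost-to-finish of A's greedy, recursively over the (least-significant-first) digit list,
-- with incoming carry t; Gg [] t = t accounts for the final extra press when a carry leaves
-- the most significant digit.
def Gg : List Int → Int → Int
  | [], t => t
  | d :: rest, t =>
    let n := d + t
    if n > 5 then 10 - n + Gg rest 1
    else if n = 5 then 5 + Gg rest (if rest.headD 0 ≤ 4 then 0 else 1)
    else n + Gg rest 0

def DigitList (l : List Int) : Prop := ∀ d ∈ l, 0 ≤ d ∧ d ≤ 9

-- One-step unfolding equations (so rewriting is controlled; the definitions are by rfl).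
theorem pvLoopA_cons (i : Char) (rest : List Char) (ans temp : Int) :
    pvLoopA (i :: rest) ans temp =
      (if pvDigit i + temp > 5 then
        (if rest = [] then ans + (10 - (pvDigit i + temp)) + 1
         else pvLoopA rest (ans + (10 - (pvDigit i + temp))) 1)
      else if pvDigit i + temp = 5 then
        (if rest = [] then ans + 5
         else if pvDigit (rest.headD '0') ≤ 4 then pvLoopA rest (ans + (pvDigit i + temp)) 0
         else pvLoopA rest (ans + (10 - (pvDigit i + temp))) 1)
      else pvLoopA rest (ans + (pvDigit i + temp)) 0) := rfl

theorem Gg_cons (d : Int) (rest : List Int) (t : Int) :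
    Gg (d :: rest) t =
      (if d + t > 5 then 10 - (d + t) + Gg rest 1
       else if d + t = 5 then 5 + Gg rest (if rest.headD 0 ≤ 4 then 0 else 1)
       else (d + t) + Gg rest 0) := rfl

-- A's loop equals the accumulator plus the greedy cost (carry 1 is only ever fed into a
-- nonempty remainder, matching ever reaching pvLoopA [] only with temp = 0).
theorem loopA_eq (l : List Char) : ∀ (ans t : Int),
    (t = 0 ∨ (t = 1 ∧ l ≠ [])) → pvLoopA l ans t = ans + Gg (l.map pvDigit) t := by
  induction l with
  | nil =>
    intro ans t ht
    rcases ht with rfl | ⟨_, hne⟩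
    · simp [pvLoopA, Gg]
    · exact absurd rfl hne
  | cons c rest ih =>
    intro ans t _ht
    rcases rest with _ | ⟨c2, rest'⟩
    · simp only [pvLoopA, Gg, List.map]
      split_ifs <;> simp_all <;> try ring
    · have hne : (c2 :: rest' : List Char) ≠ [] := by simp
      rw [pvLoopA_cons,
        show List.map pvDigit (c :: c2 :: rest') = pvDigit c :: pvDigit c2 :: List.map pvDigit rest' from rfl,
        Gg_cons, if_neg hne, if_neg hne]
      simp only [List.headD_cons]
      split_ifs with h1 h2 h3
      · rw [ih _ 1 (Or.inr ⟨rfl, hne⟩)]; simp only [List.map]; ring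
      · rw [ih _ 0 (Or.inl rfl)]; simp only [List.map]; rw [h2]; ring
      · rw [ih _ 1 (Or.inr ⟨rfl, hne⟩)]; simp only [List.map]; rw [h2]; ring
      · rw [ih _ 0 (Or.inl rfl)]; simp only [List.map]; ring

-- M: a carry changes the greedy cost by at most 1.  H: if the next (least-significant) digit
-- is ≤ 4 the carry-0 cost is the smaller, if ≥ 5 the carry-1 cost is.
theorem Gg_MH (l : List Int) (hl : DigitList l) :
    ((Gg l 1 ≤ Gg l 0 + 1 ∧ Gg l 0 ≤ Gg l 1 + 1) ∧
      (∀ d2 l', l = d2 :: l' → (d2 ≤ 4 → Gg l 0 ≤ Gg l 1) ∧ (5 ≤ d2 → Gg l 1 ≤ Gg l 0))) := by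
  induction l with
  | nil =>
    refine ⟨⟨by simp [Gg], by simp [Gg]⟩, ?_⟩
    intro d2 l' h
    cases h
  | cons d rest ih =>
    have hd := hl d (List.mem_cons_self)
    have hrest : DigitList rest := fun x hx => hl x (List.mem_cons_of_mem _ hx)
    obtain ⟨⟨hM1, hM2⟩, hH⟩ := ih hrest
    rcases rest with _ | ⟨d2, rest2⟩
    · refine ⟨⟨?_, ?_⟩, ?_⟩
      · simp only [Gg, List.headD_nil]; split_ifs <;> omega
      · simp only [Gg, List.headD_nil]; split_ifs <;> omega
      · intro x l' heq
        injection heq with h1 h2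
        subst h1; subst h2
        constructor <;> (intro h; simp only [Gg, List.headD_nil]; split_ifs <;> omega)
    · have hd2 := hl d2 (by simp)
      have hH' := hH d2 rest2 rfl
      have e1 := Gg_cons d (d2 :: rest2) 1
      have e0 := Gg_cons d (d2 :: rest2) 0
      rw [List.headD_cons] at e1 e0
      by_cases hc : d2 ≤ 4
      · have hG := hH'.1 hc
        rw [if_pos hc] at e1 e0
        rw [e1, e0]
        refine ⟨⟨by split_ifs <;> omega, by split_ifs <;> omega⟩, ?_⟩
        intro x l' heq
        injection heq with h1 h2
        subst h1; subst h2
        constructor <;> (intro h; split_ifs <;> omega)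
      · have hG := hH'.2 (by omega)
        rw [if_neg hc] at e1 e0
        rw [e1, e0]
        refine ⟨⟨by split_ifs <;> omega, by split_ifs <;> omega⟩, ?_⟩
        intro x l' heq
        injection heq with h1 h2
        subst h1; subst h2
        constructor <;> (intro h; split_ifs <;> omega)

-- The greedy choice attains the Bellman minimum.
theorem Gg_bellman (d : Int) (rest : List Int) (t : Int)
    (h : DigitList (d :: rest)) (_ht : t = 0 ∨ t = 1) :
    Gg (d :: rest) t = min (d + t + Gg rest 0) (10 - (d + t) + Gg rest 1) := by
  have hd := h d (List.mem_cons_self)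
  have hrest : DigitList rest := fun x hx => h x (List.mem_cons_of_mem _ hx)
  obtain ⟨⟨hM1, hM2⟩, hH⟩ := Gg_MH rest hrest
  rcases rest with _ | ⟨d2, rest2⟩
  · simp only [Gg, List.headD_nil]
    split_ifs <;> omega
  · have hd2 := hrest d2 (by simp)
    have hH' := hH d2 rest2 rfl
    have e := Gg_cons d (d2 :: rest2) t
    rw [List.headD_cons] at e
    by_cases hc : d2 ≤ 4
    · have hG := hH'.1 hc
      rw [if_pos hc] at e
      rw [e]
      split_ifs <;> omega
    · have hG := hH'.2 (by omega)
      rw [if_neg hc] at e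
      rw [e]
      split_ifs <;> omega

def stepI (g : Int × Int) (d : Int) : Int × Int :=
  (min (d + g.1) (10 - d + g.2), min (d + 1 + g.1) (9 - d + g.2))

theorem foldB (l : List Int) : ∀ (r : List Int), DigitList l → DigitList r →
    l.foldl stepI (Gg r 0, Gg r 1) = (Gg (l.reverse ++ r) 0, Gg (l.reverse ++ r) 1) := by
  induction l with
  | nil => intro r _ _; simp
  | cons d l' ih =>
    intro r hl hr
    have hd := hl d (List.mem_cons_self)
    have hl' : DigitList l' := fun x hx => hl x (List.mem_cons_of_mem _ hx)
    have hdr : DigitList (d :: r) := by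
      intro x hx
      rcases List.mem_cons.1 hx with rfl | hx
      · exact hd
      · exact hr x hx
    have hstep : stepI (Gg r 0, Gg r 1) d = (Gg (d :: r) 0, Gg (d :: r) 1) := by
      have b0 := Gg_bellman d r 0 hdr (Or.inl rfl)
      have b1 := Gg_bellman d r 1 hdr (Or.inr rfl)
      unfold stepI
      refine Prod.ext ?_ ?_ <;> simp only
      · rw [b0]; omega
      · rw [b1]; omega
    rw [List.foldl_cons, hstep, ih (d :: r) hl' hdr]
    simp [List.reverse_cons, List.append_assoc]

theorem digitChar_bound (m : Nat) (hm : m < 10) :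
    48 ≤ (Nat.digitChar m).toNat ∧ (Nat.digitChar m).toNat ≤ 57 := by
  interval_cases m <;> decide

theorem toDigitsCore_mem_digit : ∀ (f n : Nat) (acc : List Char) (c : Char),
    c ∈ Nat.toDigitsCore 10 f n acc → c ∈ acc ∨ (48 ≤ c.toNat ∧ c.toNat ≤ 57) := by
  intro f
  induction f with
  | zero => intro n acc c hc; exact Or.inl hc
  | succ f ih =>
    intro n acc c hc
    simp only [Nat.toDigitsCore] at hc
    split at hc
    · rcases List.mem_cons.1 hc with rfl | hc
      · exact Or.inr (digitChar_bound _ (Nat.mod_lt _ (by norm_num)))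
      · exact Or.inl hc
    · rcases ih _ _ _ hc with hc' | hc'
      · rcases List.mem_cons.1 hc' with rfl | hc''
        · exact Or.inr (digitChar_bound _ (Nat.mod_lt _ (by norm_num)))
        · exact Or.inl hc''
      · exact Or.inr hc'

theorem toChars_digits (storey : Int) (h : 0 ≤ storey) :
    DigitList ((PySem.Int.toChars storey).map pvDigit) := by
  intro x hx
  obtain ⟨c, hc, rfl⟩ := List.mem_map.1 hx
  have hch : 48 ≤ c.toNat ∧ c.toNat ≤ 57 := by
    have : PySem.Int.toChars storey = Nat.toDigits 10 storey.toNat := by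
      unfold PySem.Int.toChars
      rw [if_neg (by omega)]
    rw [this] at hc
    rcases toDigitsCore_mem_digit (storey.toNat + 1) storey.toNat [] c hc with h | h
    · cases h
    · exact h
  unfold pvDigit
  omega

-- ===== VERDICT (by name: the statement is the Claim_ definition above) =====
theorem solution_spec : Claim_equal_solution := by
  intro storey _hdom hpre
  unfold Spec_solution solution solution_alt
  have hd := toChars_digits storey hpre
  have h1 : pvLoopA (PySem.Int.toChars storey).reverse 0 0
      = Gg (((PySem.Int.toChars storey).map pvDigit).reverse) 0 := by
    rw [loopA_eq _ 0 0 (Or.inl rfl), List.map_reverse]; ring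
  have h2 : ((PySem.Int.toChars storey).foldl
      (fun g ch =>
        let d := pvDigit ch
        (min (d + g.1) (10 - d + g.2), min (d + 1 + g.1) (9 - d + g.2)))
      (0, 1))
      = (((PySem.Int.toChars storey).map pvDigit).foldl stepI (0, 1)) := by
    rw [List.foldl_map]; rfl
  have h3 := foldB ((PySem.Int.toChars storey).map pvDigit) [] hd (by intro d hd'; cases hd')
  rw [h1, h2]
  simp only [List.append_nil] at h3
  rw [show ((0 : Int), (1 : Int)) = (Gg [] 0, Gg [] 1) from rfl, h3]
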